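-- pv_equiv track=rewrite | github.com/workgroupengineering/Flowery.NET | Utils/generate_site.py | _clean_code_block
-- ===== SOURCE A (Python) =====
-- def _clean_code_block(code: str) -> str:
--     """Clean up code block content - remove excessive blank lines."""
--     lines = code.split('\n')
--     # Remove leading/trailing blank lines
--     while lines and not lines[0].strip():
--         lines.pop(0)
--     while lines and not lines[-1].strip():
--         lines.pop()
--     # Collapse multiple consecutive blank lines into one
--     result = []
--     prev_blank = False
--     for line in lines:
--         is_blank = not line.strip()
--         if is_blank:
--             if not prev_blank:
--                 result.append('')
--             prev_blank = True
--         else: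
--             result.append(line)
--             prev_blank = False
--     return '\n'.join(result)
-- ===== SOURCE B (Python) =====
-- def _clean_code_block(code: str) -> str:
--     """Clean up code block content - remove excessive blank lines."""
--     lines = code.split('\n')
--     n = len(lines)
--     out = []
--     i = 0
--     while i < n:
--         if lines[i].strip():
--             out.append(lines[i])
--             i += 1
--         else:
--             # skip the whole run of blank lines; keep one '' unless the run
--             # touches the start or the end of the block
--             j = i
--             while j < n and not lines[j].strip():
--                 j += 1
--             if i > 0 and j < n:
--                 out.append('')
--             i = j
--     return '\n'.join(out)
-- ===== Notes on version B (the rewrite author's own statement) =====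
-- stated objective: simpler
-- what changed: Replaces A's pop(0)/pop() end-trimming passes plus a prev_blank flag fold with one run-skipping scan that jumps over each blank run at once and emits a single '' only for interior runs.
import Mathlib
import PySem

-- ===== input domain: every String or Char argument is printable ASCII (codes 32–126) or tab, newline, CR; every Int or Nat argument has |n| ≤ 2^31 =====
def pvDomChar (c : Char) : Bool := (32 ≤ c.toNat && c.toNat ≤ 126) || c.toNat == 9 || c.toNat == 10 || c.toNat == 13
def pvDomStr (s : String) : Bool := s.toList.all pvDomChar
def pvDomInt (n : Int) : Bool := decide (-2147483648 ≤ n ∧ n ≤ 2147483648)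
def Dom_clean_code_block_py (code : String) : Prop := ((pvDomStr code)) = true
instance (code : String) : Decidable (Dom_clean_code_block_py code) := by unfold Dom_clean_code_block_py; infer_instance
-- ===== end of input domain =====

-- B replaces A's pop(0)/pop() trimming plus a prev_blank flag by a single run-skipping
-- scan (skip each blank run at once; emit '' only for interior runs): simpler, same cost.

-- ===== PORT A =====

-- while lines and not lines[0].strip(): lines.pop(0)
def pvTrimFront (ls : List String) : List String :=
  match ls with
  | [] => []
  | l :: rest => if PySem.Str.strip l == "" then pvTrimFront rest else l :: rest

-- while lines and not lines[-1].strip(): lines.pop()  (structural recursion from the right)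
def pvTrimBack (ls : List String) : List String :=
  match ls with
  | [] => []
  | l :: rest =>
    match pvTrimBack rest with
    | [] => if PySem.Str.strip l == "" then [] else [l]
    | r => l :: r

-- for line in lines: …  with state (result, prev_blank)
def pvFoldA (acc : List String) (prevBlank : Bool) (ls : List String) : List String :=
  match ls with
  | [] => acc
  | l :: rest =>
    if PySem.Str.strip l == "" then
      if prevBlank then pvFoldA acc true rest
      else pvFoldA (acc ++ [""]) true rest
    else pvFoldA (acc ++ [l]) false rest

def clean_code_block_py (code : String) : String :=
  -- code.split('\n'): split? is some since the separator "\n" is non-empty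
  PySem.Str.join "\n"
    (pvFoldA [] false (pvTrimBack (pvTrimFront ((PySem.Str.split? code "\n").getD []))))

-- ===== PORT B =====

-- the outer while loop of B; `first` is Python's `i == 0` test, the inner
-- `while j < n and not lines[j].strip(): j += 1` is the dropWhile
def pvAltLoop (acc : List String) (first : Bool) (ls : List String) : List String :=
  match ls with
  | [] => acc
  | l :: rest =>
    if PySem.Str.strip l == "" then
      if first = false ∧ (l :: rest).dropWhile (fun x => PySem.Str.strip x == "") ≠ [] then
        pvAltLoop (acc ++ [""]) false ((l :: rest).dropWhile (fun x => PySem.Str.strip x == ""))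
      else
        pvAltLoop acc false ((l :: rest).dropWhile (fun x => PySem.Str.strip x == ""))
    else pvAltLoop (acc ++ [l]) false rest
termination_by ls.length
decreasing_by
  · simp only [List.dropWhile_cons, *]
    exact Nat.lt_succ_of_le (by simp_all [List.length_dropWhile_le])
  · simp only [List.dropWhile_cons, *]
    exact Nat.lt_succ_of_le (by simp_all [List.length_dropWhile_le])
  · simp

def clean_code_block_py_alt (code : String) : String :=
  PySem.Str.join "\n" (pvAltLoop [] true ((PySem.Str.split? code "\n").getD []))

-- ===== PRECONDITION & SPEC =====
def Spec_clean_code_block_py (code : String) (out : String) : Prop := out = clean_code_block_py_alt code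
instance (code : String) (out : String) : Decidable (Spec_clean_code_block_py code out) := by unfold Spec_clean_code_block_py; infer_instance

-- ===== CLAIM (what is proved, stated in full; the proofs are below) =====
def Claim_equal_clean_code_block_py : Prop := ∀ (code : String), Dom_clean_code_block_py code → Spec_clean_code_block_py code (clean_code_block_py code)

-- ===== LEMMAS AND PROOFS =====

theorem pv_trimFront_eq_dropWhile (ls : List String) :
    pvTrimFront ls = ls.dropWhile (fun x => PySem.Str.strip x == "") := by
  induction ls with
  | nil => rfl
  | cons l rest ih =>
    simp only [pvTrimFront, List.dropWhile_cons]
    split_ifs with h <;> simp [ih]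

theorem pv_trimBack_cons_nonblank (l : String) (rest : List String)
    (h : ¬ (PySem.Str.strip l == "") = true) :
    pvTrimBack (l :: rest) = l :: pvTrimBack rest := by
  simp only [pvTrimBack]
  cases pvTrimBack rest <;> simp [h]

theorem pv_trimBack_all_blank (ls : List String)
    (h : ∀ x ∈ ls, (PySem.Str.strip x == "") = true) :
    pvTrimBack ls = [] := by
  induction ls with
  | nil => rfl
  | cons l rest ih =>
    simp only [pvTrimBack]
    rw [ih (fun x hx => h x (List.mem_cons_of_mem _ hx))]
    simp [h l (List.mem_cons_self ..)]

theorem pv_trimBack_append (bs rest : List String) (h : pvTrimBack rest ≠ []) :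
    pvTrimBack (bs ++ rest) = bs ++ pvTrimBack rest := by
  induction bs with
  | nil => rfl
  | cons b bs ih =>
    simp only [List.cons_append, pvTrimBack, ih]
    cases hb : bs ++ pvTrimBack rest with
    | nil => simp_all
    | cons => rfl

-- a blank run at `prevBlank = true` is skipped entirely
theorem pv_foldA_blank_run (bs t : List String) (acc : List String)
    (h : ∀ x ∈ bs, (PySem.Str.strip x == "") = true) :
    pvFoldA acc true (bs ++ t) = pvFoldA acc true t := by
  induction bs with
  | nil => rfl
  | cons b bs ih =>
    simp only [List.cons_append, pvFoldA, h b (List.mem_cons_self ..), if_pos]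
    exact ih (fun x hx => h x (List.mem_cons_of_mem _ hx))

-- prevBlank is irrelevant when the next line is non-blank (or the list ends)
theorem pv_foldA_true_eq_false (t : List String) (acc : List String)
    (h : ∀ l rest, t = l :: rest → ¬ (PySem.Str.strip l == "") = true) :
    pvFoldA acc true t = pvFoldA acc false t := by
  cases t with
  | nil => rfl
  | cons l rest => simp [pvFoldA, h l rest rfl]

theorem pv_dropWhile_head_nonblank (ls : List String) (l : String) (rest : List String)
    (h : ls.dropWhile (fun x => PySem.Str.strip x == "") = l :: rest) :
    ¬ (PySem.Str.strip l == "") = true := by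
  intro hb
  have := List.head?_dropWhile_not (fun x => PySem.Str.strip x == "") ls
  rw [h] at this
  simp_all

-- main lemma: B's run-skipping loop equals A's trim-back + flag fold
theorem pv_main (n : Nat) : ∀ (ls : List String), ls.length ≤ n → ∀ acc,
    pvAltLoop acc false ls = pvFoldA acc false (pvTrimBack ls) := by
  induction n with
  | zero =>
    intro ls h acc
    have : ls = [] := List.eq_nil_of_length_eq_zero (Nat.le_zero.mp h)
    subst this
    simp [pvAltLoop, pvFoldA, pvTrimBack]
  | succ n ih =>
    intro ls h acc
    cases ls with
    | nil => simp [pvAltLoop, pvFoldA, pvTrimBack]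
    | cons l rest =>
      by_cases hb : (PySem.Str.strip l == "") = true
      · -- blank head: B skips the whole run
        rw [pvAltLoop, if_pos hb]
        set rest' := (l :: rest).dropWhile (fun x => PySem.Str.strip x == "") with hrest'
        have hdrop : rest' = rest.dropWhile (fun x => PySem.Str.strip x == "") := by
          simp [hrest', hb]
        have hlen : rest'.length ≤ n := by
          rw [hdrop]
          exact Nat.le_trans (List.length_dropWhile_le _ _) (Nat.le_of_succ_le_succ h)
        have hsplit : rest.takeWhile (fun x => PySem.Str.strip x == "") ++ rest' = rest := by
          rw [hdrop]; exact List.takeWhile_append_dropWhile ..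
        have hdecomp : l :: rest = (l :: rest.takeWhile (fun x => PySem.Str.strip x == "")) ++ rest' := by
          simp [hsplit]
        by_cases hne : rest' = []
        · -- trailing blank run: everything is blank, the back trim gives []
          rw [if_neg (by simp [hne]), hne, pvAltLoop]
          have : pvTrimBack (l :: rest) = [] := by
            apply pv_trimBack_all_blank
            intro x hx
            rw [hdecomp, hne, List.append_nil] at hx
            rcases List.mem_cons.mp hx with h1 | h1
            · subst h1; exact hb
            · exact List.mem_takeWhile_imp (p := fun x => PySem.Str.strip x == "") h1
          rw [this]
          rfl
        · -- interior blank run: one '' is emitted on both sides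
          rw [if_pos ⟨rfl, hne⟩]
          obtain ⟨l', rest'', hr⟩ := List.exists_cons_of_ne_nil hne
          have hl' : ¬ (PySem.Str.strip l' == "") = true := by
            apply pv_dropWhile_head_nonblank (l :: rest) l' rest''
            rw [← hrest', hr]
          have htb : pvTrimBack rest' ≠ [] := by
            rw [hr, pv_trimBack_cons_nonblank _ _ hl']
            simp
          rw [hdecomp, pv_trimBack_append _ _ htb]
          simp only [List.cons_append]
          rw [pvFoldA, if_pos hb, if_neg (by simp)]
          rw [pv_foldA_blank_run _ _ _ (fun x hx => List.mem_takeWhile_imp (p := fun x => PySem.Str.strip x == "") hx)]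
          rw [pv_foldA_true_eq_false _ _ (by
            intro a b hab
            rw [hr, pv_trimBack_cons_nonblank _ _ hl'] at hab
            injection hab with h1 _
            subst h1; exact hl')]
          exact ih rest' hlen (acc ++ [""])
      · -- non-blank head: both consume one line
        rw [pvAltLoop, if_neg hb]
        rw [pv_trimBack_cons_nonblank _ _ hb, pvFoldA]
        rw [if_neg hb]
        exact ih rest (Nat.le_of_succ_le_succ h) (acc ++ [l])

-- first step: with first = true the leading blank run is dropped, as A's front trim does
theorem pv_altLoop_true (ls : List String) (acc : List String) :
    pvAltLoop acc true ls = pvAltLoop acc false (pvTrimFront ls) := by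
  rw [pv_trimFront_eq_dropWhile]
  cases ls with
  | nil => simp [pvAltLoop]
  | cons l rest =>
    by_cases hb : (PySem.Str.strip l == "") = true
    · rw [pvAltLoop, if_pos hb, if_neg (by simp)]
    · rw [List.dropWhile_cons, if_neg (by simp [hb])]
      rw [pvAltLoop, if_neg hb, pvAltLoop, if_neg hb]

-- ===== VERDICT (by name: the statement is the Claim_ definition above) =====
theorem clean_code_block_py_spec : Claim_equal_clean_code_block_py := by
  intro code _
  unfold Spec_clean_code_block_py clean_code_block_py clean_code_block_py_alt
  rw [pv_altLoop_true,
    pv_main (pvTrimFront ((PySem.Str.split? code "\n").getD [])).length _ (Nat.le_refl _)]
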